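-- pv_equiv track=rewrite | github.com/sjogleka/General_codes | aishwarya_06_17.py | teamFormation
-- ===== SOURCE A (Python) =====
-- import math
--
-- def teamFormation(skills, minPlayers, minLevel, maxLevel):
--     temp = []
--     total = 0
--     for ele in skills:
--         if minLevel<=ele<=maxLevel:
--             temp.append(ele)
--     if len(temp)<minPlayers:
--         return 0
--
--
--     while minPlayers<=len(temp):
--         total+=math.factorial(len(temp)) // (math.factorial(minPlayers) * math.factorial(len(temp)-minPlayers))
--         minPlayers+=1
--     return total
-- ===== SOURCE B (Python) =====
-- def teamFormation(skills, minPlayers, minLevel, maxLevel):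
--     m = 0
--     for x in skills:
--         if minLevel <= x <= maxLevel:
--             m += 1
--     if m < minPlayers:
--         return 0
--     if minPlayers <= 0:
--         return 1 << m
--     # complement identity: answer = 2^m - sum_{k < minPlayers} C(m, k);
--     # the lower tail is read off a Pascal-triangle row built by additions only.
--     row = [1]
--     for _ in range(m):
--         nxt = [1]
--         for j in range(1, min(len(row) + 1, minPlayers)):
--             nxt.append(row[j - 1] + (row[j] if j < len(row) else 0))
--         row = nxt
--     return (1 << m) - sum(row)
-- ===== Notes on version B (the rewrite author's own statement) =====
-- stated objective: alternative
-- what changed: B replaces A's filtered list and per-term factorial formula by the complement identity 2^m - sum_{k<minPlayers} C(m,k): it counts the in-range skills and reads the lower tail off a Pascal-triangle row built by additions only (no factorials, no multiplication or division).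
import Mathlib
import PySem

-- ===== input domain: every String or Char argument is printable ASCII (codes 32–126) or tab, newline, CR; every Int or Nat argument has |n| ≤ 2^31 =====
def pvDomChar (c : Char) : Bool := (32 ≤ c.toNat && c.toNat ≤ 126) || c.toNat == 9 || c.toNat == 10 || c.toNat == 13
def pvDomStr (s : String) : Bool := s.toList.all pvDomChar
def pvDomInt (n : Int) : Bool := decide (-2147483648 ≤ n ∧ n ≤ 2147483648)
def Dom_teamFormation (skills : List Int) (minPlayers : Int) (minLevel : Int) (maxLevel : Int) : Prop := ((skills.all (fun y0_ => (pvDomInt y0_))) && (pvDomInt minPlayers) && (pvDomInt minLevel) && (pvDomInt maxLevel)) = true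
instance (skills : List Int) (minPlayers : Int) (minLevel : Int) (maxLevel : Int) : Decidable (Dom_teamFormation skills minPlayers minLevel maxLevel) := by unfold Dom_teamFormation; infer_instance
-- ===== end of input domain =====

-- B uses the complement identity: answer = 2^m - sum_{k<minPlayers} C(m,k), with the lower tail read
-- off a Pascal-triangle row built by additions only, replacing A's per-term factorial formula.


-- ===== PORT A =====
-- the while loop: while mp <= len(temp): total += m! // (mp! * (m-mp)!); mp += 1
def teamLoopA (m : Nat) (mp : Int) (total : Int) : Int :=
  if mp ≤ (m : Int) then
    teamLoopA m (mp + 1)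
      (total + PySem.Int.floordiv ((Nat.factorial m : Int))
        ((Nat.factorial mp.toNat : Int) * (Nat.factorial (m - mp.toNat) : Int)))
  else total
termination_by ((m : Int) + 1 - mp).toNat
decreasing_by omega

def teamFormation (skills : List Int) (minPlayers : Int) (minLevel : Int) (maxLevel : Int) : Int :=
  let temp := skills.foldl (fun acc ele => if minLevel ≤ ele ∧ ele ≤ maxLevel then acc ++ [ele] else acc) []
  if (temp.length : Int) < minPlayers then 0
  else teamLoopA temp.length minPlayers 0

-- ===== PORT B =====
-- one Pascal step: nxt = [1]; for j in range(1, min(len(row)+1, minPlayers)): nxt.append(row[j-1] + (row[j] if j < len(row) else 0))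
-- (row[j-1] is always in range there, so getD's default is never used)
def nextRow (mp : Nat) (row : List Int) : List Int :=
  1 :: (List.range' 1 (min (row.length + 1) mp - 1)).map
    (fun j => row.getD (j - 1) 0 + (if j < row.length then row.getD j 0 else 0))

def teamFormation_alt (skills : List Int) (minPlayers : Int) (minLevel : Int) (maxLevel : Int) : Int :=
  let m := skills.foldl (fun (acc : Nat) x => if minLevel ≤ x ∧ x ≤ maxLevel then acc + 1 else acc) 0
  if (m : Int) < minPlayers then 0
  else if minPlayers ≤ 0 then 2 ^ m    -- 1 << m
  else 2 ^ m - ((List.range m).foldl (fun row _ => nextRow minPlayers.toNat row) [1]).sum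

-- ===== PRECONDITION & SPEC =====
-- Pre_ excludes minPlayers < 0, on which A raises ValueError (math.factorial of a negative int).
def Pre_teamFormation (skills : List Int) (minPlayers : Int) (minLevel : Int) (maxLevel : Int) : Prop :=
  0 ≤ minPlayers
instance (skills : List Int) (minPlayers : Int) (minLevel : Int) (maxLevel : Int) : Decidable (Pre_teamFormation skills minPlayers minLevel maxLevel) := by unfold Pre_teamFormation; infer_instance
def pvWitness_teamFormation : List Int × Int × Int × Int := ([1, 2, 3, 4], 2, 1, 3)

def Spec_teamFormation (skills : List Int) (minPlayers : Int) (minLevel : Int) (maxLevel : Int) (out : Int) : Prop := out = teamFormation_alt skills minPlayers minLevel maxLevel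
instance (skills : List Int) (minPlayers : Int) (minLevel : Int) (maxLevel : Int) (out : Int) : Decidable (Spec_teamFormation skills minPlayers minLevel maxLevel out) := by unfold Spec_teamFormation; infer_instance

-- ===== CLAIM (what is proved, stated in full; the proofs are below) =====
def Claim_equal_teamFormation : Prop := ∀ (skills : List Int) (minPlayers : Int) (minLevel : Int) (maxLevel : Int), Dom_teamFormation skills minPlayers minLevel maxLevel → Pre_teamFormation skills minPlayers minLevel maxLevel → Spec_teamFormation skills minPlayers minLevel maxLevel (teamFormation skills minPlayers minLevel maxLevel)
-- ===== LEMMAS AND PROOFS =====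

-- A's append loop builds exactly the filter of skills.
theorem foldl_append_filter (p : Int → Prop) [DecidablePred p] (l : List Int) (acc : List Int) :
    l.foldl (fun acc ele => if p ele then acc ++ [ele] else acc) acc
      = acc ++ l.filter (fun x => decide (p x)) := by
  induction l generalizing acc with
  | nil => simp
  | cons x xs ih => by_cases h : p x <;> simp [List.foldl, h, ih]

-- B's counting loop counts the filter.
theorem foldl_count (p : Int → Prop) [DecidablePred p] (l : List Int) (n : Nat) :
    l.foldl (fun (acc : Nat) x => if p x then acc + 1 else acc) n
      = n + (l.filter (fun x => decide (p x))).length := by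
  induction l generalizing n with
  | nil => simp
  | cons x xs ih => by_cases h : p x <;> simp [List.foldl, h, ih] <;> omega

-- A's loop term is the binomial coefficient.
theorem termA_eq_choose (m j : Nat) (hj : j ≤ m) :
    PySem.Int.floordiv ((Nat.factorial m : Int))
        ((Nat.factorial ((j : Int)).toNat : Int) * (Nat.factorial (m - ((j : Int)).toNat) : Int))
      = (Nat.choose m j : Int) := by
  have : ((Nat.factorial j : Int) * (Nat.factorial (m - j) : Int))
      = ((Nat.factorial j * Nat.factorial (m - j) : Nat) : Int) := by push_cast; ring
  simp only [Int.toNat_natCast, this, PySem.Int.floordiv_natCast]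
  exact_mod_cast congrArg (Nat.cast : Nat → Int)
    (Nat.choose_eq_factorial_div_factorial hj).symm

-- A's while loop sums the binomials from j up to m.
theorem teamLoopA_eq_sum (m : Nat) : ∀ (d j : Nat), m + 1 - j = d → j ≤ m + 1 → ∀ (total : Int),
    teamLoopA m (j : Int) total = total + ∑ k ∈ Finset.Icc j m, (Nat.choose m k : Int) := by
  intro d
  induction d with
  | zero =>
    intro j hd hj total
    rw [teamLoopA, if_neg (by exact_mod_cast (by omega : ¬ j ≤ m)),
      Finset.Icc_eq_empty (by omega)]
    simp
  | succ n ih =>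
    intro j hd hj total
    have hjm : j ≤ m := by omega
    rw [teamLoopA, if_pos (by exact_mod_cast hjm)]
    have h1 : ((j : Int) + 1) = ((j + 1 : Nat) : Int) := by push_cast; ring
    rw [termA_eq_choose m j hjm, h1, ih (j + 1) (by omega) (by omega)]
    rw [show Finset.Icc j m = insert j (Finset.Icc (j + 1) m) by
      ext k; simp [Finset.mem_Icc, Finset.mem_insert]; omega]
    rw [Finset.sum_insert (by simp)]
    ring

theorem getD_map_range (t k : Nat) (h : Nat → Int) (hk : k < t) :
    ((List.range t).map h).getD k 0 = h k := by
  rw [List.getD_eq_getElem _ _ (by simpa using hk)]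
  simp

-- one Pascal step turns row i (truncated at p) into row i+1 (truncated at p).
theorem rowStep (p i : Nat) (hp : 1 ≤ p) :
    nextRow p ((List.range (min (i + 1) p)).map (fun k => (Nat.choose i k : Int)))
      = (List.range (min (i + 2) p)).map (fun k => (Nat.choose (i + 1) k : Int)) := by
  have hlen : ((List.range (min (i + 1) p)).map (fun k => (Nat.choose i k : Int))).length
      = min (i + 1) p := by simp
  have hmin : min (min (i + 1) p + 1) p = min (i + 2) p := by omega
  unfold nextRow
  rw [hlen, hmin]
  have hs1 : 1 ≤ min (i + 2) p := by omega
  have hr : List.range (min (i + 2) p) = 0 :: List.range' 1 (min (i + 2) p - 1) := by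
    rw [show min (i + 2) p = (min (i + 2) p - 1) + 1 by omega, List.range_eq_range',
      List.range'_succ]
    norm_num
  rw [hr, List.map_cons]
  simp only [Nat.choose_zero_right, Nat.cast_one]
  congr 1
  apply List.map_congr_left
  intro j hj
  have hj' : 1 ≤ j ∧ j < min (i + 2) p := by
    have := List.mem_range'_1.mp hj; omega
  have hjt : j - 1 < min (i + 1) p := by omega
  rw [getD_map_range _ _ _ hjt]
  by_cases h : j < min (i + 1) p
  · rw [if_pos h, getD_map_range _ _ _ h]
    have hje : j = (j - 1) + 1 := by omega
    rw [hje, Nat.choose_succ_succ i (j - 1)]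
    push_cast; ring
  · rw [if_neg h]
    have hji : j = i + 1 ∧ min (i + 1) p = i + 1 := by omega
    rw [hji.1, show i + 1 - 1 = i from rfl]
    simp [Nat.choose_self]

-- the fold of Pascal steps builds row i, truncated at p.
theorem rows_eq (p : Nat) (hp : 1 ≤ p) : ∀ (i : Nat),
    (List.range i).foldl (fun row _ => nextRow p row) [1]
      = (List.range (min (i + 1) p)).map (fun k => (Nat.choose i k : Int)) := by
  intro i
  induction i with
  | zero => simp [show min 1 p = 1 by omega, List.range_one]
  | succ n ih =>
    rw [List.range_succ, List.foldl_append, List.foldl_cons, List.foldl_nil, ih,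
      rowStep p n hp]

theorem sum_map_range (n : Nat) (f : Nat → Int) :
    ((List.range n).map f).sum = ∑ k ∈ Finset.range n, f k := by
  induction n with
  | zero => simp
  | succ m ih => rw [List.range_succ, Finset.sum_range_succ]; simp [ih]

-- row sum of Pascal's triangle, cast to Int.
theorem sum_choose_int (m : Nat) :
    (∑ k ∈ Finset.range (m + 1), (Nat.choose m k : Int)) = 2 ^ m := by
  have := Nat.sum_range_choose m
  exact_mod_cast congrArg (Nat.cast : Nat → Int) this

-- splitting the full row at p.
theorem split_sum (m p : Nat) (hpm : p ≤ m) :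
    (2 : Int) ^ m - (∑ k ∈ Finset.range p, (Nat.choose m k : Int))
      = ∑ k ∈ Finset.Icc p m, (Nat.choose m k : Int) := by
  have h := Finset.sum_Ico_consecutive (fun k => (Nat.choose m k : Int))
    (Nat.zero_le p) (by omega : p ≤ m + 1)
  have hicc : Finset.Ico p (m + 1) = Finset.Icc p m := by
    ext k; simp [Finset.mem_Ico, Finset.mem_Icc]
  have h2 := sum_choose_int m
  rw [Finset.range_eq_Ico] at h2
  rw [Finset.range_eq_Ico, ← hicc]
  simp only at h
  omega

-- ===== VERDICT (by name: the statement is the Claim_ definition above) =====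
theorem teamFormation_spec : Claim_equal_teamFormation := by
  intro skills mp minL maxL _ hpre
  unfold Spec_teamFormation teamFormation teamFormation_alt
  rw [foldl_append_filter (fun ele => minL ≤ ele ∧ ele ≤ maxL) skills [],
    foldl_count (fun x => minL ≤ x ∧ x ≤ maxL) skills 0]
  simp only [List.nil_append, Nat.zero_add]
  set m := (skills.filter (fun x => decide (minL ≤ x ∧ x ≤ maxL))).length with hm
  by_cases hlt : (m : Int) < mp
  · rw [if_pos hlt, if_pos hlt]
  · rw [if_neg hlt, if_neg hlt]
    have h0 : (0 : Int) ≤ mp := hpre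
    obtain ⟨n, hn⟩ : ∃ n : Nat, mp = (n : Int) := ⟨mp.toNat, by omega⟩
    subst hn
    have hnm : n ≤ m := by exact_mod_cast not_lt.mp hlt
    rw [teamLoopA_eq_sum m (m + 1 - n) n rfl (by omega) 0]
    by_cases hz : (n : Int) ≤ 0
    · have hn0 : n = 0 := by omega
      subst hn0
      rw [if_pos hz, ← split_sum m 0 (Nat.zero_le m)]
      simp
    · rw [if_neg hz]
      have hn1 : 1 ≤ n := by omega
      rw [show ((n : Int)).toNat = n from Int.toNat_natCast n,
        rows_eq n hn1 m, show min (m + 1) n = n by omega, sum_map_range,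
        ← split_sum m n hnm]
      ring
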